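-- pv_equiv track=rewrite | github.com/renierht/Kosmulator | Plots/Plot_functions.py | align_table_to_parameters
-- ===== SOURCE A (Python) =====
-- from typing import Any, Dict, List, Mapping, Optional, Sequence, Tuple
--
-- def align_table_to_parameters(
--     latex_table: List[List[str]],
--     parameters: List[List[str]]
-- ) -> List[List[str]]:
--     """Align each row of `latex_table` to the union of parameters (first-seen order)."""
--     # union (order preserved)
--     full: List[str] = []
--     seen = set()
--     for plist in parameters:
--         for p in plist:
--             if p not in seen:
--                 seen.add(p)
--                 full.append(p)
--     pos = {p: i for i, p in enumerate(full)}
--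
--     # align each observation row into full width
--     out: List[List[str]] = []
--     for row, obs_params in zip(latex_table, parameters):
--         aligned = [""] * len(full)
--         for val, pname in zip(row, obs_params):
--             j = pos.get(pname)
--             if j is not None:
--                 aligned[j] = val
--         out.append(aligned)
--     return out
-- ===== SOURCE B (Python) =====
-- def align_table_to_parameters(latex_table, parameters):
--     """Align each row of `latex_table` to the union of parameters (first-seen order)."""
--     # union (order preserved) — same first-seen construction
--     full = []
--     seen = set()
--     for plist in parameters:
--         for p in plist:
--             if p not in seen:
--                 seen.add(p)
--                 full.append(p)
--     # gather: for each row build a per-row dict and read the union parameters off it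
--     out = []
--     for row, obs_params in zip(latex_table, parameters):
--         row_map = dict(zip(obs_params, row))
--         out.append([row_map.get(p, "") for p in full])
--     return out
-- ===== Notes on version B (the rewrite author's own statement) =====
-- stated objective: idiomatic
-- what changed: The scatter-style alignment (preallocated row plus a global parameter->index dict written into by position) is replaced by a gather: each row becomes a per-row dict(zip(obs_params, row)) and the aligned row is read off as [row_map.get(p, "") for p in full].
import Mathlib
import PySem

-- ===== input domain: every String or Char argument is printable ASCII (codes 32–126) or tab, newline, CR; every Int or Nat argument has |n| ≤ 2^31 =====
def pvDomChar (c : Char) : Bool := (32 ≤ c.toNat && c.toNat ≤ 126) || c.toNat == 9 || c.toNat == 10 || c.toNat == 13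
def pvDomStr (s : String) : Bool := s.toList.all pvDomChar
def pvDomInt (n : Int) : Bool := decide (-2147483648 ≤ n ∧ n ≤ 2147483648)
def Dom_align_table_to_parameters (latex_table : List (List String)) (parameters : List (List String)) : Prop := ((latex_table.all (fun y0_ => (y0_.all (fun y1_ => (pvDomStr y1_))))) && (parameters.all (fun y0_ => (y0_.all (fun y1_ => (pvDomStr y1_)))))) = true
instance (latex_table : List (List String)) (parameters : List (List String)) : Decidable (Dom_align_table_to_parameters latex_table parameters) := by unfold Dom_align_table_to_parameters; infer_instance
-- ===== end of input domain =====

-- B replaces A's scatter alignment (preallocated row written through a global parameter→index dict)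
-- by a gather (a per-row dict read off along the union); objective: idiomatic, same cost.

-- ===== PORT A =====
-- first-seen union loop, identical in both Pythons (full list + seen set)
def pvUnionFirstSeen (parameters : List (List String)) : List String × PySem.Set String :=
  parameters.foldl (fun acc plist =>
    plist.foldl (fun acc2 p =>
      if PySem.Set.contains acc2.2 p then acc2
      else (acc2.1 ++ [p], PySem.Set.add acc2.2 p)) acc)
    ([], PySem.Set.empty)

def align_table_to_parameters (latex_table : List (List String)) (parameters : List (List String)) : List (List String) :=
  let full := (pvUnionFirstSeen parameters).1
  let pos : PySem.Dict String Int :=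
    (PySem.List.enumerate full).foldl (fun d ip => d.insert ip.2 ip.1) PySem.Dict.empty
  (latex_table.zip parameters).foldl (fun out rp =>
    let aligned :=
      (rp.1.zip rp.2).foldl (fun aligned vp =>
        match pos.get? vp.2 with
        | some j => PySem.List.pySetD aligned j vp.1
        | none => aligned) (List.replicate full.length "")
    out ++ [aligned]) []

-- ===== PORT B =====
def align_table_to_parameters_alt (latex_table : List (List String)) (parameters : List (List String)) : List (List String) :=
  let full := (pvUnionFirstSeen parameters).1
  (latex_table.zip parameters).foldl (fun out rp =>
    let row_map : PySem.Dict String String :=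
      (rp.2.zip rp.1).foldl (fun d kv => d.insert kv.1 kv.2) PySem.Dict.empty
    out ++ [full.map (fun p => row_map.getD p "")]) []

-- ===== PRECONDITION & SPEC =====
def Spec_align_table_to_parameters (latex_table : List (List String)) (parameters : List (List String)) (out : List (List String)) : Prop := out = align_table_to_parameters_alt latex_table parameters
instance (latex_table : List (List String)) (parameters : List (List String)) (out : List (List String)) : Decidable (Spec_align_table_to_parameters latex_table parameters out) := by unfold Spec_align_table_to_parameters; infer_instance

-- ===== CLAIM (what is proved, stated in full; the proofs are below) =====
def Claim_equal_align_table_to_parameters : Prop := ∀ (latex_table : List (List String)) (parameters : List (List String)), Dom_align_table_to_parameters latex_table parameters → Spec_align_table_to_parameters latex_table parameters (align_table_to_parameters latex_table parameters)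

-- ===== LEMMAS AND PROOFS =====

-- the union loop is set(flatten) in first-seen order, paired with itself
theorem pvUnion_inner (plist : List String) (s : PySem.Set String) :
    plist.foldl (fun acc2 p =>
      if PySem.Set.contains acc2.2 p then acc2
      else (acc2.1 ++ [p], PySem.Set.add acc2.2 p)) (s, s)
    = (PySem.Set.update s plist, PySem.Set.update s plist) := by
  induction plist generalizing s with
  | nil => simp [PySem.Set.update]
  | cons p t ih =>
    simp only [List.foldl_cons]
    by_cases h : p ∈ s
    · have hc : PySem.Set.contains s p = true := by
        simpa [PySem.Set.contains_iff] using h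
      rw [hc, if_pos rfl, ih, PySem.Set.update_cons, PySem.Set.add_of_mem h]
    · have hc : PySem.Set.contains s p = false := by
        simpa [PySem.Set.contains_iff] using h
      rw [hc, if_neg (by simp), PySem.Set.add_of_not_mem h, ih, PySem.Set.update_cons,
        PySem.Set.add_of_not_mem h]

theorem pvUnion_outer (parameters : List (List String)) (s : PySem.Set String) :
    parameters.foldl (fun acc plist =>
      plist.foldl (fun acc2 p =>
        if PySem.Set.contains acc2.2 p then acc2
        else (acc2.1 ++ [p], PySem.Set.add acc2.2 p)) acc) (s, s)
    = (PySem.Set.update s parameters.flatten, PySem.Set.update s parameters.flatten) := by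
  induction parameters generalizing s with
  | nil => simp [PySem.Set.update]
  | cons plist t ih =>
    simp only [List.foldl_cons, pvUnion_inner, ih, List.flatten_cons,
      PySem.Set.update_append]

theorem pvFull_eq (parameters : List (List String)) :
    (pvUnionFirstSeen parameters).1 = PySem.Set.ofList parameters.flatten := by
  unfold pvUnionFirstSeen
  rw [show (([], PySem.Set.empty) : List String × PySem.Set String)
        = ((PySem.Set.empty : PySem.Set String), (PySem.Set.empty : PySem.Set String)) from rfl,
    pvUnion_outer]
  rfl

theorem pvFull_nodup (parameters : List (List String)) :
    (pvUnionFirstSeen parameters).1.Nodup := by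
  rw [pvFull_eq]; exact PySem.Set.nodup_ofList _

theorem pvMem_full {parameters : List (List String)} {plist : List String} {p : String}
    (hp : plist ∈ parameters) (hm : p ∈ plist) : p ∈ (pvUnionFirstSeen parameters).1 := by
  rw [pvFull_eq]
  exact (PySem.Set.mem_ofList _ _).2 (List.mem_flatten.2 ⟨plist, hp, hm⟩)

-- the position dict: looking up full[j] yields j
theorem pvPos_items (full : List String) (hnd : full.Nodup) :
    ((PySem.List.enumerate full).foldl (fun d ip => d.insert ip.2 ip.1)
        (PySem.Dict.empty : PySem.Dict String Int)).items
    = (PySem.List.enumerate full).map (fun ip => (ip.2, ip.1)) := by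
  have h := PySem.Dict.items_foldl_insert_fresh (l := PySem.List.enumerate full)
    (k := fun ip => ip.2) (v := fun ip => ip.1) (d := (PySem.Dict.empty : PySem.Dict String Int))
    (by intro a _; simp [PySem.Dict.contains_empty])
    (by simpa [PySem.List.map_snd_enumerate] using hnd)
  simpa using h

theorem pvPos_get (full : List String) (hnd : full.Nodup) (j : Nat) (hj : j < full.length) :
    ((PySem.List.enumerate full).foldl (fun d ip => d.insert ip.2 ip.1)
        (PySem.Dict.empty : PySem.Dict String Int)).get? full[j] = some (j : Int) := by
  apply PySem.Dict.get?_of_mem_items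
  · rw [pvPos_items full hnd]
    refine List.mem_map.2 ⟨((j : Int), full[j]), ?_, rfl⟩
    exact (PySem.List.mem_enumerate_iff _ _ _).2 ⟨j, hj, by simp⟩
  · have : ((PySem.List.enumerate full).foldl (fun d ip => d.insert ip.2 ip.1)
        (PySem.Dict.empty : PySem.Dict String Int)).keys
        = ((PySem.List.enumerate full).map (fun ip => (ip.2, ip.1))).map (·.1) := by
      simp [PySem.Dict.keys, pvPos_items full hnd]
    rw [this]
    simpa [Function.comp_def, PySem.List.map_snd_enumerate] using hnd

-- setting position idx(p) in a map over full rewrites exactly the p entry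
theorem pvSet_map (full : List String) (hnd : full.Nodup) (g : String → String)
    (j : Nat) (hj : j < full.length) (v : String) :
    (full.map g).set j v = full.map (fun q => if q = full[j] then v else g q) := by
  apply List.ext_getElem
  · simp
  · intro i h1 h2
    by_cases hij : i = j
    · subst hij
      simp [List.getElem_map]
    · have hi : i < full.length := by simpa using h1
      have hji : j ≠ i := fun he => hij he.symm
      have : full[i] ≠ full[j] := by
        intro he
        exact hij ((List.Nodup.getElem_inj_iff hnd).1 he)
      simp [List.getElem_map, this, hji]

-- last-wins value of key p among (value, key) pairs
def pvLast (L : List (String × String)) (p : String) (c : String) : String :=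
  L.foldl (fun acc vp => if vp.2 = p then vp.1 else acc) c

-- A's scatter loop over a map of full computes the last-wins value per parameter
theorem pvScatter (full : List String) (hnd : full.Nodup)
    (L : List (String × String)) (hL : ∀ vp ∈ L, vp.2 ∈ full) (g : String → String) :
    L.foldl (fun aligned vp =>
      match ((PySem.List.enumerate full).foldl (fun d ip => d.insert ip.2 ip.1)
          (PySem.Dict.empty : PySem.Dict String Int)).get? vp.2 with
      | some j => PySem.List.pySetD aligned j vp.1
      | none => aligned) (full.map g)
    = full.map (fun p => pvLast L p (g p)) := by
  induction L generalizing g with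
  | nil => simp [pvLast]
  | cons vp t ih =>
    have hmem : vp.2 ∈ full := hL vp (List.mem_cons_self)
    obtain ⟨j, hj, hje⟩ := List.getElem_of_mem hmem
    simp only [List.foldl_cons]
    rw [show vp.2 = full[j] from hje.symm, pvPos_get full hnd j hj]
    have hred : (match some ((j : Int)) with
        | some j => PySem.List.pySetD (full.map g) j vp.1
        | none => full.map g) = PySem.List.pySetD (full.map g) ((j : Int)) vp.1 := rfl
    have hset : PySem.List.pySetD (full.map g) (j : Int) vp.1 = (full.map g).set j vp.1 := by
      simp [PySem.List.pySetD_natCast]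
    rw [hred, hset, pvSet_map full hnd g j hj vp.1,
      ih (fun q hq => hL q (List.mem_cons_of_mem _ hq))]
    apply List.map_congr_left
    intro p _
    simp only [pvLast, List.foldl_cons, hje]
    by_cases hpq : p = vp.2
    · simp [hpq]
    · simp [hpq, Ne.symm hpq]

-- B's per-row dict lookup is the same last-wins value
theorem pvGather (L : List (String × String)) (p : String) (d : PySem.Dict String String) :
    (L.foldl (fun d kv => d.insert kv.1 kv.2) d).getD p "" =
      L.foldl (fun acc kv => if kv.1 = p then kv.2 else acc) (d.getD p "") := by
  induction L generalizing d with
  | nil => simp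
  | cons kv t ih =>
    simp only [List.foldl_cons, ih, PySem.Dict.getD_insert]
    by_cases h : p = kv.1
    · simp [h]
    · simp [h, Ne.symm h]

-- folding (key, value) pairs of zip obs row = folding (value, key) pairs of zip row obs
theorem pvZipSwap (obs row : List String) (p : String) (c : String) :
    (obs.zip row).foldl (fun acc kv => if kv.1 = p then kv.2 else acc) c
    = pvLast (row.zip obs) p c := by
  induction obs generalizing row c with
  | nil => cases row <;> simp [pvLast]
  | cons o t ih =>
    cases row with
    | nil => simp [pvLast]
    | cons v r =>
      simp only [List.zip_cons_cons, List.foldl_cons, pvLast, ih]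

-- ===== VERDICT (by name: the statement is the Claim_ definition above) =====
theorem align_table_to_parameters_spec : Claim_equal_align_table_to_parameters := by
  intro latex_table parameters _
  unfold Spec_align_table_to_parameters align_table_to_parameters align_table_to_parameters_alt
  simp only []
  rw [PySem.List.foldl_append_singleton_eq_map, PySem.List.foldl_append_singleton_eq_map]
  simp only [List.nil_append]
  apply List.map_congr_left
  intro rp hrp
  have hobs : rp.2 ∈ parameters := (List.of_mem_zip hrp).2
  have hnd := pvFull_nodup parameters
  have hrepl : List.replicate (pvUnionFirstSeen parameters).1.length ""
      = (pvUnionFirstSeen parameters).1.map (fun _ => "") := by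
    simp [List.map_const']
  rw [hrepl, pvScatter (pvUnionFirstSeen parameters).1 hnd (rp.1.zip rp.2)
    (fun vp hvp => pvMem_full hobs (List.of_mem_zip hvp).2) (fun _ => "")]
  apply List.map_congr_left
  intro p _
  rw [pvGather, PySem.Dict.getD_empty, pvZipSwap]
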